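-- pv_equiv track=rewrite | github.com/peterch405/scRNA_SPRITE | scripts/python/remove_multialigners.py | find_unique
-- ===== SOURCE A (Python) =====
-- from collections import defaultdict
--
-- def find_unique(sets_of_reads):
--     '''Find unique reads for each dataset
--
--     Args:
--         sets_of_reads(dict): A file (k) dict of read names (v)
--     '''
--     datasets = set(sets_of_reads.keys())
--     unique_sets_of_reads = defaultdict(set)
--
--     for k, v in sets_of_reads.items():
--         the_rest = datasets.difference(set([k]))
--         other_reads = set()
--
--         for k2,v2 in sets_of_reads.items():
--             if k2 in the_rest:
--                 other_reads.update(v2)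
--
--         unique_sets_of_reads[k] = v.difference(other_reads)
--
--     return(unique_sets_of_reads)
-- ===== SOURCE B (Python) =====
-- from collections import defaultdict
--
-- def find_unique(sets_of_reads):
--     '''Find unique reads for each dataset
--
--     One pass counts, for every read, how many datasets contain it; a read is
--     unique to its dataset exactly when that count is 1.
--     '''
--     counts = defaultdict(int)
--     for reads in sets_of_reads.values():
--         for r in reads:
--             counts[r] += 1
--     return defaultdict(set, {k: {r for r in v if counts[r] == 1}
--                              for k, v in sets_of_reads.items()})
-- ===== Notes on version B (the rewrite author's own statement) =====
-- stated objective: faster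
-- what changed: Instead of rebuilding, for every dataset, the union of all other datasets' reads (a nested scan over the whole dict), B counts in one global pass how many datasets contain each read and then keeps, per dataset, the reads whose count is 1.
import Mathlib
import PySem

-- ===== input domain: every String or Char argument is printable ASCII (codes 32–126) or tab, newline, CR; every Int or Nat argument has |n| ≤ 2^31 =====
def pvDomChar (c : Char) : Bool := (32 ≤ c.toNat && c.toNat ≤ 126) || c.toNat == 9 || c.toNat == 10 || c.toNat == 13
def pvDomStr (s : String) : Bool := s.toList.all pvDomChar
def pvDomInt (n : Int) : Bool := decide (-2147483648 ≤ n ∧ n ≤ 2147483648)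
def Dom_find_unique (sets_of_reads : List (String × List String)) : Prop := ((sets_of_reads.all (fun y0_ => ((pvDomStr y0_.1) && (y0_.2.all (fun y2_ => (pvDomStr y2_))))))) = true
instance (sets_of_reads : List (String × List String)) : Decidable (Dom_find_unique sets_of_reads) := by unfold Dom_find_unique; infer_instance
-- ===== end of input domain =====

-- B replaces A's per-dataset union over all other datasets with one global read-occurrence
-- count followed by a single filtering pass (objective: faster).


-- ===== PORT A =====
def find_unique (sets_of_reads : List (String × List String)) : List (String × List String) :=
  let datasets : PySem.Set String := PySem.Set.ofList (sets_of_reads.map Prod.fst)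
  let unique_sets_of_reads : PySem.Dict String (List String) :=
    sets_of_reads.foldl (fun acc p =>
      let the_rest : PySem.Set String := PySem.Set.diff datasets (PySem.Set.ofList [p.1])
      let other_reads : PySem.Set String :=
        sets_of_reads.foldl (fun o p2 =>
          if PySem.Set.contains the_rest p2.1 then PySem.Set.update o p2.2 else o)
          PySem.Set.empty
      acc.insert p.1 (PySem.Set.diff p.2 other_reads))
      PySem.Dict.empty
  unique_sets_of_reads.items

-- ===== PORT B =====
def find_unique_alt (sets_of_reads : List (String × List String)) : List (String × List String) :=
  let counts : PySem.Dict String Int :=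
    sets_of_reads.foldl (fun d p => p.2.foldl (fun d r => d.modify r 0 (· + 1)) d)
      PySem.Dict.empty
  sets_of_reads.map (fun p => (p.1, p.2.filter (fun r => counts.getD r 0 == 1)))

-- ===== PRECONDITION & SPEC =====
-- Pre_ excludes association lists that are not faithful encodings of the Python argument
-- (a dict[str, set[str]]): a list with a duplicated key or a duplicated read inside one
-- value list does not represent any Python input to this function.
def Pre_find_unique (sets_of_reads : List (String × List String)) : Prop :=
  (sets_of_reads.map Prod.fst).Nodup ∧ ∀ p ∈ sets_of_reads, p.2.Nodup
instance (sets_of_reads : List (String × List String)) : Decidable (Pre_find_unique sets_of_reads) := by unfold Pre_find_unique; infer_instance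
def pvWitness_find_unique : (List (String × List String)) :=
  [("a", ["x", "y"]), ("b", ["y", "z"])]

def Spec_find_unique (sets_of_reads : List (String × List String)) (out : List (String × List String)) : Prop := out = find_unique_alt sets_of_reads
instance (sets_of_reads : List (String × List String)) (out : List (String × List String)) : Decidable (Spec_find_unique sets_of_reads out) := by unfold Spec_find_unique; infer_instance

-- ===== CLAIM (what is proved, stated in full; the proofs are below) =====
def Claim_equal_find_unique : Prop := ∀ (sets_of_reads : List (String × List String)), Dom_find_unique sets_of_reads → Pre_find_unique sets_of_reads → Spec_find_unique sets_of_reads (find_unique sets_of_reads)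

-- ===== LEMMAS AND PROOFS =====

-- B's counting loop computes, for every read, the total number of its occurrences.
theorem pv_counts_getD (l : List (String × List String)) (d : PySem.Dict String Int) (r : String) :
    (l.foldl (fun d p => p.2.foldl (fun d r => d.modify r 0 (· + 1)) d) d).getD r 0
      = d.getD r 0 + (((l.map (fun p => p.2.count r)).sum : Nat) : Int) := by
  induction l generalizing d with
  | nil => simp
  | cons q t ih =>
    simp only [List.foldl_cons, List.map_cons, List.sum_cons, ih,
      PySem.Dict.getD_foldl_modify_add_one]
    push_cast
    ring

-- A's inner loop: membership in the accumulated union of the selected datasets.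
theorem pv_other_mem (l : List (String × List String)) (rest : PySem.Set String)
    (s : PySem.Set String) (r : String) :
    r ∈ l.foldl (fun o p2 =>
        if PySem.Set.contains rest p2.1 then PySem.Set.update o p2.2 else o) s
      ↔ r ∈ s ∨ ∃ p ∈ l, PySem.Set.contains rest p.1 = true ∧ r ∈ p.2 := by
  induction l generalizing s with
  | nil => simp
  | cons q t ih =>
    simp only [List.foldl_cons]
    by_cases h : PySem.Set.contains rest q.1 = true
    · simp only [h, if_true, ih, PySem.Set.mem_update]
      constructor
      · rintro ((hs | hq) | ⟨p, hp, hc, hr⟩)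
        · exact Or.inl hs
        · exact Or.inr ⟨q, List.mem_cons_self .., h, hq⟩
        · exact Or.inr ⟨p, List.mem_cons_of_mem _ hp, hc, hr⟩
      · rintro (hs | ⟨p, hp, hc, hr⟩)
        · exact Or.inl (Or.inl hs)
        · rcases List.mem_cons.1 hp with rfl | hp'
          · exact Or.inl (Or.inr hr)
          · exact Or.inr ⟨p, hp', hc, hr⟩
    · simp only [h, ih]
      constructor
      · rintro (hs | ⟨p, hp, hc, hr⟩)
        · exact Or.inl hs
        · exact Or.inr ⟨p, List.mem_cons_of_mem _ hp, hc, hr⟩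
      · rintro (hs | ⟨p, hp, hc, hr⟩)
        · exact Or.inl hs
        · rcases List.mem_cons.1 hp with rfl | hp'
          · exact absurd hc h
          · exact Or.inr ⟨p, hp', hc, hr⟩

-- A's outer loop builds the dict by inserting each (fresh) key once, in order.
theorem pv_items_foldl_insert (f : String × List String → List String) :
    ∀ (l : List (String × List String)) (d : PySem.Dict String (List String)),
    (l.map Prod.fst).Nodup → (∀ p ∈ l, d.contains p.1 = false) →
    (l.foldl (fun acc p => acc.insert p.1 (f p)) d).items
      = d.items ++ l.map (fun p => (p.1, f p)) := by
  intro l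
  induction l with
  | nil => simp
  | cons q t ih =>
    intro d hnd hfree
    simp only [List.map_cons, List.nodup_cons] at hnd
    have hq : d.contains q.1 = false := hfree q (List.mem_cons_self ..)
    have hstep : (d.insert q.1 (f q)).items = d.items ++ [(q.1, f q)] :=
      PySem.Dict.items_insert_of_not_contains _ _ hq
    have hfree' : ∀ p ∈ t, (d.insert q.1 (f q)).contains p.1 = false := by
      intro p hp
      have hne : p.1 ≠ q.1 := by
        intro h
        exact hnd.1 (h ▸ List.mem_map_of_mem hp)
      simp [PySem.Dict.contains_insert, hne, hfree p (List.mem_cons_of_mem _ hp)]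
    simp only [List.foldl_cons, List.map_cons]
    rw [ih _ hnd.2 hfree', hstep]
    simp

-- 1 ≤ the occurrence sum when some listed dataset contains the read.
theorem pv_one_le_sum (l : List (String × List String)) (p : String × List String)
    (r : String) (hp : p ∈ l) (hr : r ∈ p.2) :
    1 ≤ (l.map (fun q => q.2.count r)).sum := by
  induction l with
  | nil => cases hp
  | cons q t ih =>
    rcases List.mem_cons.1 hp with h | h
    · subst h
      have : 1 ≤ p.2.count r := List.count_pos_iff.2 hr
      simp only [List.map_cons, List.sum_cons]
      omega
    · have := ih h
      simp only [List.map_cons, List.sum_cons]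
      omega

-- The heart of the equivalence: with unique keys and duplicate-free values, the
-- occurrence count of a read r ∈ p.2 is 1 exactly when no OTHER dataset contains r.
theorem pv_sum_eq_one_iff :
    ∀ (l : List (String × List String)) (p : String × List String) (r : String),
    (l.map Prod.fst).Nodup → (∀ q ∈ l, q.2.Nodup) → p ∈ l → r ∈ p.2 →
    ((l.map (fun q => q.2.count r)).sum = 1 ↔ ¬ ∃ q ∈ l, q.1 ≠ p.1 ∧ r ∈ q.2) := by
  intro l
  induction l with
  | nil => intro p r _ _ hp; cases hp
  | cons q t ih =>
    intro p r hnd hvals hp hr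
    simp only [List.map_cons, List.nodup_cons] at hnd
    simp only [List.map_cons, List.sum_cons]
    rcases List.mem_cons.1 hp with h | h
    · -- p is the head entry
      subst h
      have hc : p.2.count r = 1 :=
        List.count_eq_one_of_mem (hvals p (List.mem_cons_self ..)) hr
      have htail : ∀ q' ∈ t, q'.1 ≠ p.1 := by
        intro q' hq' h
        exact hnd.1 (h ▸ List.mem_map_of_mem hq')
      rw [hc]
      constructor
      · rintro hsum ⟨q', hq', hne, hrq'⟩
        rcases List.mem_cons.1 hq' with rfl | hq't
        · exact hne rfl
        · have h1 := pv_one_le_sum t q' r hq't hrq'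
          omega
      · intro hnex
        have hz : (t.map (fun q => q.2.count r)).sum = 0 := by
          by_contra hnz
          have hex : ∃ q' ∈ t, r ∈ q'.2 := by
            by_contra hall
            push Not at hall
            have : (t.map (fun q => q.2.count r)).sum = 0 :=
              List.sum_eq_zero (by
                intro x hx
                rcases List.mem_map.1 hx with ⟨q', hq', rfl⟩
                exact List.count_eq_zero.2 (hall q' hq'))
            exact hnz this
          rcases hex with ⟨q', hq', hrq'⟩
          exact hnex ⟨q', List.mem_cons_of_mem _ hq', htail q' hq', hrq'⟩
        omega
    · -- p is in the tail
      have hq1 : q.1 ≠ p.1 := by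
        intro hk
        exact hnd.1 (by rw [hk]; exact List.mem_map_of_mem h)
      have hS := ih p r hnd.2 (fun q' hq' => hvals q' (List.mem_cons_of_mem _ hq')) h hr
      have hge := pv_one_le_sum t p r h hr
      constructor
      · rintro hsum ⟨q', hq', hne, hrq'⟩
        rcases List.mem_cons.1 hq' with rfl | hq't
        · have : 1 ≤ q'.2.count r := List.count_pos_iff.2 hrq'
          omega
        · have hS1 : (t.map (fun q => q.2.count r)).sum = 1 := by omega
          exact (hS.1 hS1) ⟨q', hq't, hne, hrq'⟩
      · intro hnex
        have hq0 : q.2.count r = 0 := by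
          apply List.count_eq_zero.2
          intro hrq
          exact hnex ⟨q, List.mem_cons_self .., hq1, hrq⟩
        have hS1 : (t.map (fun q => q.2.count r)).sum = 1 :=
          hS.2 (by
            rintro ⟨q', hq', hne, hrq'⟩
            exact hnex ⟨q', List.mem_cons_of_mem _ hq', hne, hrq'⟩)
        omega

-- ===== VERDICT (by name: the statement is the Claim_ definition above) =====
theorem find_unique_spec : Claim_equal_find_unique := by
  intro l _ hpre
  obtain ⟨hkeys, hvals⟩ := hpre
  show find_unique l = find_unique_alt l
  simp only [find_unique, find_unique_alt]
  rw [pv_items_foldl_insert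
        (f := fun p => PySem.Set.diff p.2
          (l.foldl (fun o p2 =>
            if PySem.Set.contains
                (PySem.Set.diff (PySem.Set.ofList (l.map Prod.fst)) (PySem.Set.ofList [p.1]))
                p2.1
              then PySem.Set.update o p2.2 else o) PySem.Set.empty))
        l PySem.Dict.empty hkeys (by intro p _; simp [PySem.Dict.contains_empty])]
  rw [show (PySem.Dict.empty : PySem.Dict String (List String)).items = [] from rfl,
     List.nil_append]
  apply List.map_congr_left
  intro p hp
  refine Prod.ext rfl ?_
  show PySem.Set.diff p.2 _ = p.2.filter _
  have hdiff : ∀ (s t : PySem.Set String),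
      PySem.Set.diff s t = s.filter (fun x => !(PySem.Set.contains t x)) := by
    intro s t; rfl
  rw [hdiff]
  apply List.filter_congr
  intro r hr
  rw [pv_counts_getD l PySem.Dict.empty r, PySem.Dict.getD_empty, zero_add]
  have hsum := pv_sum_eq_one_iff l p r hkeys hvals hp hr
  have hmem : r ∈ l.foldl (fun o p2 =>
      if PySem.Set.contains
          (PySem.Set.diff (PySem.Set.ofList (l.map Prod.fst)) (PySem.Set.ofList [p.1]))
          p2.1
        then PySem.Set.update o p2.2 else o) PySem.Set.empty
      ↔ ∃ q ∈ l, q.1 ≠ p.1 ∧ r ∈ q.2 := by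
    rw [pv_other_mem]
    constructor
    · rintro (hs | ⟨q, hq, hc, hrq⟩)
      · cases hs
      · refine ⟨q, hq, ?_, hrq⟩
        have := (PySem.Set.contains_iff _ _).1 hc
        rw [PySem.Set.mem_diff, PySem.Set.mem_ofList, PySem.Set.mem_ofList] at this
        simpa using this.2
    · rintro ⟨q, hq, hne, hrq⟩
      refine Or.inr ⟨q, hq, ?_, hrq⟩
      apply (PySem.Set.contains_iff _ _).2
      rw [PySem.Set.mem_diff, PySem.Set.mem_ofList, PySem.Set.mem_ofList]
      exact ⟨List.mem_map_of_mem hq, by simpa using hne⟩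
  rw [Bool.eq_iff_iff]
  simp only [Bool.not_eq_eq_eq_not, Bool.not_true, beq_iff_eq]
  constructor
  · intro hnc
    have hnm : ¬ (∃ q ∈ l, q.1 ≠ p.1 ∧ r ∈ q.2) := by
      rw [← hmem]
      intro hm
      rw [(PySem.Set.contains_iff _ _).2 hm] at hnc
      exact absurd hnc (by simp)
    have : (l.map (fun q => q.2.count r)).sum = 1 := hsum.2 hnm
    exact_mod_cast congrArg (Nat.cast : Nat → Int) this
  · intro hone
    have h1 : (l.map (fun q => q.2.count r)).sum = 1 := by exact_mod_cast hone
    have hnm := hsum.1 h1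
    rw [← hmem] at hnm
    cases hcb : PySem.Set.contains _ r
    · rfl
    · exact absurd ((PySem.Set.contains_iff _ _).1 hcb) hnm
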